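-- pv_equiv track=rewrite | github.com/Learner11571/DSL | GroupA2.py | highest_and_lowest_score
-- ===== SOURCE A (Python) =====
-- def highest_and_lowest_score(marks):
--     highest = None
--     lowest = None
--     for mark in marks:
--         if mark != -1:
--             if highest is None or mark > highest:
--                 highest = mark
--             if lowest is None or mark < lowest:
--                 lowest = mark
--     return highest, lowest
-- ===== SOURCE B (Python) =====
-- def highest_and_lowest_score(marks):
--     kept = [m for m in marks if m != -1]
--     if not kept:
--         return None, None
--     return max(kept), min(kept)
-- ===== Notes on version B (the rewrite author's own statement) =====
-- stated objective: simpler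
-- what changed: Replaces the fused single pass with interleaved None-tracking by a filter of the -1 sentinels followed by the builtin max and min over the kept list (guarded for emptiness).
import Mathlib
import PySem

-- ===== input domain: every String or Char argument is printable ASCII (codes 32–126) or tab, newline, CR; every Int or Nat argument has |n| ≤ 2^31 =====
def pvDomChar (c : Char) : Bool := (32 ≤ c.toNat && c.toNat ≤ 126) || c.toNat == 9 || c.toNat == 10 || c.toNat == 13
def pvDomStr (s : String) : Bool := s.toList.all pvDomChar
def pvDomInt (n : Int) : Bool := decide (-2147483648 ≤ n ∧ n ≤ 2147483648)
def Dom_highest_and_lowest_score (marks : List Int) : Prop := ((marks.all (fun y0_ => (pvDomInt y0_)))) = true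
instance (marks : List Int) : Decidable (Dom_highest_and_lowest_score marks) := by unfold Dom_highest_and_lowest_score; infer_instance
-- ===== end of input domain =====

-- B replaces A's fused single pass with a filter of the -1 sentinels followed by max/min (simpler decomposition).


-- ===== PORT A =====
-- loop body of A: update highest, then lowest, when mark ≠ -1
def pvStepA (st : Option Int × Option Int) (mark : Int) : Option Int × Option Int :=
  if mark ≠ -1 then
    ((match st.1 with
      | none => some mark
      | some h => if mark > h then some mark else some h),
     (match st.2 with
      | none => some mark
      | some l => if mark < l then some mark else some l))
  else st

def highest_and_lowest_score (marks : List Int) : Option Int × Option Int :=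
  marks.foldl pvStepA (none, none)

-- ===== PORT B =====
def highest_and_lowest_score_alt (marks : List Int) : Option Int × Option Int :=
  let kept := marks.filter (fun m => decide (m ≠ -1))
  if kept = [] then (none, none)
  else (PySem.List.max? kept (fun y => y), PySem.List.min? kept (fun y => y))

-- ===== PRECONDITION & SPEC =====
def Spec_highest_and_lowest_score (marks : List Int) (out : Option Int × Option Int) : Prop := out = highest_and_lowest_score_alt marks
instance (marks : List Int) (out : Option Int × Option Int) : Decidable (Spec_highest_and_lowest_score marks out) := by unfold Spec_highest_and_lowest_score; infer_instance

-- ===== CLAIM (what is proved, stated in full; the proofs are below) =====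
def Claim_equal_highest_and_lowest_score : Prop := ∀ (marks : List Int), Dom_highest_and_lowest_score marks → Spec_highest_and_lowest_score marks (highest_and_lowest_score marks)

-- ===== LEMMAS AND PROOFS =====

theorem pv_foldl_some (xs : List Int) : ∀ (h l : Int),
    xs.foldl pvStepA (some h, some l) =
      (some ((xs.filter (fun m => decide (m ≠ -1))).foldl max h),
       some ((xs.filter (fun m => decide (m ≠ -1))).foldl min l)) := by
  induction xs with
  | nil => intro h l; simp
  | cons m t ih =>
    intro h l
    by_cases hm : m = -1
    · subst hm; simpa [pvStepA] using ih h l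
    · have h1 : (if m > h then some m else some h) = some (max h m) := by
        split_ifs <;> (congr 1; omega)
      have h2 : (if m < l then some m else some l) = some (min l m) := by
        split_ifs <;> (congr 1; omega)
      simp [pvStepA, hm, h1, h2, ih]

theorem pv_foldl_none (xs : List Int) :
    xs.foldl pvStepA (none, none) =
      match xs.filter (fun m => decide (m ≠ -1)) with
      | [] => (none, none)
      | x :: t => (some (t.foldl max x), some (t.foldl min x)) := by
  induction xs with
  | nil => simp
  | cons m t ih =>
    by_cases hm : m = -1
    · subst hm; simpa [pvStepA] using ih
    · simp [pvStepA, hm, pv_foldl_some]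

-- ===== VERDICT (by name: the statement is the Claim_ definition above) =====
theorem highest_and_lowest_score_spec : Claim_equal_highest_and_lowest_score := by
  intro marks _
  unfold Spec_highest_and_lowest_score highest_and_lowest_score highest_and_lowest_score_alt
  rw [pv_foldl_none]
  cases hk : marks.filter (fun m => decide (m ≠ -1)) with
  | nil => simp
  | cons x t =>
    simp [PySem.List.max?_id_cons, PySem.List.min?_id_cons]
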